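-- pv_equiv track=rewrite | github.com/AnnaGrBio/DESWOMAN | module_global_alignment_properties.py | splice_alignment
-- ===== SOURCE A (Python) =====
-- def splice_alignment(alignment):
--     denovo = alignment[0]
--     nchit = alignment[1]
--     new_seq_denovo = ""
--     new_seq_hit = ""
--     list_introns = []
--     seq_intron = ""
--     for number in range(0,len(denovo)):
--         nucl_denovo = denovo[number]
--         if nucl_denovo != "a" and nucl_denovo != "t" and nucl_denovo != "g" and nucl_denovo != "c" and nucl_denovo != "n":
--             if seq_intron != "":
--                 list_introns.append(seq_intron)
--                 seq_intron = ""
--             new_seq_denovo += nucl_denovo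
--             new_seq_hit += nchit[number]
--         else:
--             seq_intron += nucl_denovo
--     if seq_intron != "":
--         list_introns.append(seq_intron)
--     alignment = [new_seq_denovo,new_seq_hit,alignment[2],alignment[3],alignment[4]]
--     return alignment,list_introns
-- ===== SOURCE B (Python) =====
-- def splice_alignment(alignment):
--     denovo = alignment[0]
--     nchit = alignment[1]
--     introns = []
--     aligned_d = []
--     aligned_h = []
--     i = 0
--     n = len(denovo)
--     while i < n:
--         j = i
--         if denovo[i] in "atgcn":
--             while j < n and denovo[j] in "atgcn":
--                 j += 1
--             introns.append(denovo[i:j])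
--         else:
--             while j < n and denovo[j] not in "atgcn":
--                 j += 1
--             aligned_d.append(denovo[i:j])
--             aligned_h.append(nchit[i:j])
--         i = j
--     new_alignment = ["".join(aligned_d), "".join(aligned_h),
--                      alignment[2], alignment[3], alignment[4]]
--     return new_alignment, introns
-- ===== Notes on version B (the rewrite author's own statement) =====
-- stated objective: alternative
-- what changed: A's per-character scan with an intron accumulator flushed at class changes is replaced by a two-index run scan that slices whole maximal 'atgcn'/aligned runs of alignment[0] (and the matching slice of alignment[1]) and joins the collected pieces once at the end.
import Mathlib
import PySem

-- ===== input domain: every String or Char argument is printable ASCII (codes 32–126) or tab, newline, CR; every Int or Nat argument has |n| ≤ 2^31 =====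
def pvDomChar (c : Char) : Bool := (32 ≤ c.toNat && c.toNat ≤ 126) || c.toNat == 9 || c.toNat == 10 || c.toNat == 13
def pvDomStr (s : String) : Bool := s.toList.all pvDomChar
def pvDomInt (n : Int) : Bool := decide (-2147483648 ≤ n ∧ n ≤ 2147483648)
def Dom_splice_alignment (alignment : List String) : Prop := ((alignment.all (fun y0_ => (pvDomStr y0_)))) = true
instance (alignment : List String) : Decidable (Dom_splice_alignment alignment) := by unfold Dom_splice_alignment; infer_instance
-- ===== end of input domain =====

-- B replaces A's per-character loop (with an intron accumulator flushed at class changes) by a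
-- run-based two-index scan that slices whole maximal runs; objective: alternative decomposition, equal cost.

-- ===== PORT A =====
-- the intron-nucleotide test shared by both ports ("in 'atgcn'")
def pvIntron (c : Char) : Bool := c == 'a' || c == 't' || c == 'g' || c == 'c' || c == 'n'

-- A's for-loop over range(0, len(denovo)); state = (new_seq_denovo, new_seq_hit, list_introns, seq_intron)
def spliceA_loop (denovo nchit : List Char) :
    Nat → Nat → List Char × List Char × List (List Char) × List Char →
    List Char × List Char × List (List Char) × List Char
  | 0, _, st => st
  | k + 1, i, (nd, nh, intr, si) =>
    let c := denovo.getD i ' '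
    if c ≠ 'a' ∧ c ≠ 't' ∧ c ≠ 'g' ∧ c ≠ 'c' ∧ c ≠ 'n' then
      let intr' := if si ≠ [] then intr ++ [si] else intr
      let si' : List Char := if si ≠ [] then [] else si
      spliceA_loop denovo nchit k (i + 1) (nd ++ [c], nh ++ [nchit.getD i ' '], intr', si')
    else
      spliceA_loop denovo nchit k (i + 1) (nd, nh, intr, si ++ [c])

def splice_alignment (alignment : List String) : List String × List String :=
  let denovo := (alignment.getD 0 "").toList
  let nchit := (alignment.getD 1 "").toList
  let (nd, nh, intr, si) := spliceA_loop denovo nchit denovo.length 0 ([], [], [], [])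
  let introns := if si ≠ [] then intr ++ [si] else intr
  ([String.ofList nd, String.ofList nh, alignment.getD 2 "", alignment.getD 3 "", alignment.getD 4 ""],
   introns.map String.ofList)

-- ===== PORT B =====
-- B's outer while loop: each step consumes one maximal same-class run (the inner while loop = takeWhile)
def spliceB_runs : List Char → List Char → List Char × List Char × List (List Char)
  | [], _ => ([], [], [])
  | c :: t, h =>
    if pvIntron c then
      let r := c :: t.takeWhile pvIntron
      let (ad, ah, intr) := spliceB_runs (t.dropWhile pvIntron) (h.drop r.length)
      (ad, ah, r :: intr)
    else
      let r := c :: t.takeWhile (fun x => !pvIntron x)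
      let (ad, ah, intr) := spliceB_runs (t.dropWhile (fun x => !pvIntron x)) (h.drop r.length)
      (r ++ ad, h.take r.length ++ ah, intr)
termination_by d _ => d.length
decreasing_by
  · exact Nat.lt_succ_of_le (List.length_dropWhile_le _ _)
  · exact Nat.lt_succ_of_le (List.length_dropWhile_le _ _)

def splice_alignment_alt (alignment : List String) : List String × List String :=
  let denovo := (alignment.getD 0 "").toList
  let nchit := (alignment.getD 1 "").toList
  let (ad, ah, intr) := spliceB_runs denovo nchit
  ([String.ofList ad, String.ofList ah, alignment.getD 2 "", alignment.getD 3 "", alignment.getD 4 ""],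
   intr.map String.ofList)

-- ===== PRECONDITION & SPEC =====
-- Pre_ excludes exactly the inputs on which Python A raises IndexError: fewer than 5 alignment
-- entries, or some aligned (non-'atgcn') position of alignment[0] beyond the end of alignment[1].
def Pre_splice_alignment (alignment : List String) : Prop :=
  5 ≤ alignment.length ∧
  ∀ i : Nat, i < (alignment.getD 0 "").toList.length →
    pvIntron ((alignment.getD 0 "").toList.getD i ' ') = false →
    i < (alignment.getD 1 "").toList.length

instance (alignment : List String) : Decidable (Pre_splice_alignment alignment) := by
  unfold Pre_splice_alignment; infer_instance

def pvWitness_splice_alignment : List String := ["AGatgB", "CTxyzw", "s1", "s2", "s3"]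

def Spec_splice_alignment (alignment : List String) (out : List String × List String) : Prop :=
  out = splice_alignment_alt alignment
instance (alignment : List String) (out : List String × List String) :
    Decidable (Spec_splice_alignment alignment out) := by unfold Spec_splice_alignment; infer_instance

-- ===== CLAIM (what is proved, stated in full; the proofs are below) =====
def Claim_equal_splice_alignment : Prop := ∀ (alignment : List String),
  Dom_splice_alignment alignment → Pre_splice_alignment alignment →
  Spec_splice_alignment alignment (splice_alignment alignment)


-- ===== LEMMAS AND PROOFS =====

-- A's loop, rephrased as structural recursion over the remaining suffixes of denovo/nchit
def pvStepRec : List Char → List Char → List Char × List Char × List (List Char) × List Char →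
    List Char × List Char × List (List Char) × List Char
  | [], _, st => st
  | c :: d, h, (nd, nh, intr, si) =>
    if pvIntron c = false then
      pvStepRec d (h.drop 1)
        (nd ++ [c], nh ++ [h.getD 0 ' '],
         (if si ≠ [] then intr ++ [si] else intr), (if si ≠ [] then [] else si))
    else
      pvStepRec d (h.drop 1) (nd, nh, intr, si ++ [c])

lemma pvNotIntron (c : Char) :
    (c ≠ 'a' ∧ c ≠ 't' ∧ c ≠ 'g' ∧ c ≠ 'c' ∧ c ≠ 'n') ↔ pvIntron c = false := by
  simp [pvIntron, and_assoc]

lemma pvALoop_eq (denovo nchit : List Char) :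
    ∀ (k i : Nat), i + k = denovo.length → ∀ st,
    spliceA_loop denovo nchit k i st = pvStepRec (denovo.drop i) (nchit.drop i) st := by
  intro k
  induction k with
  | zero =>
    intro i hi st
    rw [List.drop_of_length_le (by omega)]
    rfl
  | succ k ih =>
    intro i hi st
    obtain ⟨nd, nh, intr, si⟩ := st
    have hilt : i < denovo.length := by omega
    have hd : denovo.drop i = denovo[i] :: denovo.drop (i + 1) :=
      (List.getElem_cons_drop hilt).symm
    have hgd : denovo.getD i ' ' = denovo[i] := List.getD_eq_getElem denovo ' ' hilt
    have hh0 : (nchit.drop i).getD 0 ' ' = nchit.getD i ' ' := by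
      simp [List.getD, List.getElem?_drop]
    have hh1 : (nchit.drop i).drop 1 = nchit.drop (i + 1) := by
      rw [List.drop_drop]
    simp only [spliceA_loop, hgd]
    rw [hd]
    simp only [pvStepRec, hh0, hh1]
    by_cases hc : pvIntron denovo[i] = false
    · rw [if_pos ((pvNotIntron _).mpr hc), if_pos hc, ih (i + 1) (by omega)]
    · rw [if_neg (fun hp => hc ((pvNotIntron _).mp hp)), if_neg hc, ih (i + 1) (by omega)]

lemma pvStepRec_intron_run (r : List Char) :
    ∀ (d h : List Char) (nd nh : List Char) (intr : List (List Char)) (si : List Char),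
    (∀ c ∈ r, pvIntron c = true) →
    pvStepRec (r ++ d) h (nd, nh, intr, si) =
      pvStepRec d (h.drop r.length) (nd, nh, intr, si ++ r) := by
  induction r with
  | nil => intro d h nd nh intr si _; simp
  | cons c r ih =>
    intro d h nd nh intr si hr
    have hc : pvIntron c = true := hr c List.mem_cons_self
    simp only [List.cons_append, pvStepRec, hc]
    rw [if_neg (by simp [hc])]
    rw [ih d (h.drop 1) nd nh intr (si ++ [c]) (fun x hx => hr x (List.mem_cons_of_mem _ hx))]
    rw [List.drop_drop]
    simp [List.append_assoc, Nat.add_comm]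

lemma pvStepRec_aligned_run (r : List Char) :
    ∀ (d h : List Char) (nd nh : List Char) (intr : List (List Char)),
    (∀ c ∈ r, pvIntron c = false) → r.length ≤ h.length →
    pvStepRec (r ++ d) h (nd, nh, intr, []) =
      pvStepRec d (h.drop r.length) (nd ++ r, nh ++ h.take r.length, intr, []) := by
  induction r with
  | nil => intro d h nd nh intr _ _; simp
  | cons c r ih =>
    intro d h nd nh intr hr hlen
    cases h with
    | nil => simp at hlen
    | cons h0 h' =>
      have hc : pvIntron c = false := hr c List.mem_cons_self
      simp only [List.cons_append, pvStepRec, hc, eq_self_iff_true, if_true, ne_eq,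
        not_true_eq_false, if_false, List.drop_succ_cons, List.drop_zero, List.getD_cons_zero,
        ite_false]
      rw [ih d h' (nd ++ [c]) (nh ++ [h0]) intr (fun x hx => hr x (List.mem_cons_of_mem _ hx))
        (by simpa using Nat.le_of_succ_le_succ hlen)]
      simp [List.append_assoc, List.take_succ_cons, List.drop_succ_cons]

lemma pvStepRec_flush (c : Char) (t h : List Char) (nd nh : List Char)
    (intr : List (List Char)) (si : List Char) (hc : pvIntron c = false) (hsi : si ≠ []) :
    pvStepRec (c :: t) h (nd, nh, intr, si) = pvStepRec (c :: t) h (nd, nh, intr ++ [si], []) := by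
  simp [pvStepRec, hc, hsi]

-- the per-suffix form of Pre_: every aligned position of d lies inside h
def pvPreL (d h : List Char) : Prop :=
  ∀ i : Nat, i < d.length → pvIntron (d.getD i ' ') = false → i < h.length

lemma pvPreL_shift (r d h : List Char) (hp : pvPreL (r ++ d) h) : pvPreL d (h.drop r.length) := by
  intro j hj ha
  have h1 := hp (r.length + j) (by simp; omega)
    (by rw [List.getD_append_right _ _ _ _ (by omega)]; simpa)
  simp only [List.length_drop]
  omega

lemma pvPreL_run_le (r d h : List Char) (hr : ∀ c ∈ r, pvIntron c = false)
    (hp : pvPreL (r ++ d) h) : r.length ≤ h.length := by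
  by_contra hlt
  have hhr : h.length < r.length := by omega
  have h1 := hp h.length (by simp; omega)
    (by rw [List.getD_append _ _ _ _ (by omega), List.getD_eq_getElem r ' ' hhr]
        exact hr _ (List.getElem_mem hhr))
  omega

def pvFinal : List Char × List Char × List (List Char) × List Char →
    List Char × List Char × List (List Char)
  | (nd, nh, intr, si) => (nd, nh, if si ≠ [] then intr ++ [si] else intr)

lemma pvMain (n : Nat) : ∀ (d h : List Char), d.length ≤ n → pvPreL d h →
    ∀ (nd nh : List Char) (intr : List (List Char)),
    pvFinal (pvStepRec d h (nd, nh, intr, [])) =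
      (nd ++ (spliceB_runs d h).1, nh ++ (spliceB_runs d h).2.1,
       intr ++ (spliceB_runs d h).2.2) := by
  induction n with
  | zero =>
    intro d h hlen _ nd nh intr
    have hd0 : d = [] := List.eq_nil_of_length_eq_zero (by omega)
    subst hd0
    simp [pvStepRec, spliceB_runs, pvFinal]
  | succ n ih =>
    intro d h hlen hp nd nh intr
    match d with
    | [] => simp [pvStepRec, spliceB_runs, pvFinal]
    | c :: t =>
      by_cases hc : pvIntron c
      · -- intron run
        have hdec : c :: t = (c :: t.takeWhile pvIntron) ++ t.dropWhile pvIntron := by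
          simp [List.takeWhile_append_dropWhile]
        have hrall : ∀ x ∈ c :: t.takeWhile pvIntron, pvIntron x = true := by
          intro x hx
          rcases List.mem_cons.mp hx with h | h
          · exact h ▸ hc
          · exact List.mem_takeWhile_imp h
        have hL : pvStepRec (c :: t) h (nd, nh, intr, []) =
            pvStepRec (t.dropWhile pvIntron) (h.drop (c :: t.takeWhile pvIntron).length)
              (nd, nh, intr, c :: t.takeWhile pvIntron) := by
          conv_lhs => rw [hdec]
          rw [pvStepRec_intron_run _ _ _ _ _ _ _ hrall]
          simp
        have hBeq : spliceB_runs (c :: t) h =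
            ((spliceB_runs (t.dropWhile pvIntron)
                (h.drop (c :: t.takeWhile pvIntron).length)).1,
             (spliceB_runs (t.dropWhile pvIntron)
                (h.drop (c :: t.takeWhile pvIntron).length)).2.1,
             (c :: t.takeWhile pvIntron) ::
               (spliceB_runs (t.dropWhile pvIntron)
                (h.drop (c :: t.takeWhile pvIntron).length)).2.2) := by
          conv_lhs => rw [spliceB_runs]
          simp [hc]
        have hplen : (t.dropWhile pvIntron).length ≤ n := by
          have := List.length_dropWhile_le pvIntron t
          simp at hlen; omega
        have hpre' : pvPreL (t.dropWhile pvIntron)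
            (h.drop (c :: t.takeWhile pvIntron).length) :=
          pvPreL_shift _ _ _ (hdec ▸ hp)
        rw [hL, hBeq]
        cases hrest : t.dropWhile pvIntron with
        | nil =>
          simp [pvStepRec, pvFinal, spliceB_runs]
        | cons c' t' =>
          have hc' : pvIntron c' = false := by
            have := List.head?_dropWhile_not pvIntron t
            rw [hrest] at this
            simpa using this
          rw [hrest] at hpre' hplen
          rw [pvStepRec_flush c' t' (h.drop (c :: t.takeWhile pvIntron).length) nd nh intr
            (c :: t.takeWhile pvIntron) hc' (by simp)]
          rw [ih (c' :: t') _ hplen hpre' nd nh (intr ++ [c :: t.takeWhile pvIntron])]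
          simp [List.append_assoc]
      · -- aligned run
        have hc0 : pvIntron c = false := by simpa using hc
        have hdec : c :: t =
            (c :: t.takeWhile (fun x => !pvIntron x)) ++ t.dropWhile (fun x => !pvIntron x) := by
          simp [List.takeWhile_append_dropWhile]
        have hrall : ∀ x ∈ c :: t.takeWhile (fun x => !pvIntron x), pvIntron x = false := by
          intro x hx
          rcases List.mem_cons.mp hx with h | h
          · exact h ▸ hc0
          · simpa using List.mem_takeWhile_imp h
        have hrle : (c :: t.takeWhile (fun x => !pvIntron x)).length ≤ h.length :=
          pvPreL_run_le _ _ _ hrall (hdec ▸ hp)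
        have hL : pvStepRec (c :: t) h (nd, nh, intr, []) =
            pvStepRec (t.dropWhile (fun x => !pvIntron x))
              (h.drop (c :: t.takeWhile (fun x => !pvIntron x)).length)
              (nd ++ (c :: t.takeWhile (fun x => !pvIntron x)),
               nh ++ h.take (c :: t.takeWhile (fun x => !pvIntron x)).length, intr, []) := by
          conv_lhs => rw [hdec]
          rw [pvStepRec_aligned_run _ _ _ _ _ _ hrall hrle]
        have hBeq : spliceB_runs (c :: t) h =
            ((c :: t.takeWhile (fun x => !pvIntron x)) ++
               (spliceB_runs (t.dropWhile (fun x => !pvIntron x))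
                 (h.drop (c :: t.takeWhile (fun x => !pvIntron x)).length)).1,
             h.take (c :: t.takeWhile (fun x => !pvIntron x)).length ++
               (spliceB_runs (t.dropWhile (fun x => !pvIntron x))
                 (h.drop (c :: t.takeWhile (fun x => !pvIntron x)).length)).2.1,
             (spliceB_runs (t.dropWhile (fun x => !pvIntron x))
                 (h.drop (c :: t.takeWhile (fun x => !pvIntron x)).length)).2.2) := by
          conv_lhs => rw [spliceB_runs]
          simp [hc0]
        have hplen : (t.dropWhile (fun x => !pvIntron x)).length ≤ n := by
          have := List.length_dropWhile_le (fun x => !pvIntron x) t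
          simp at hlen; omega
        have hpre' : pvPreL (t.dropWhile (fun x => !pvIntron x))
            (h.drop (c :: t.takeWhile (fun x => !pvIntron x)).length) :=
          pvPreL_shift _ _ _ (hdec ▸ hp)
        rw [hL, hBeq, ih _ _ hplen hpre']
        simp [List.append_assoc]

lemma pv_top (alignment : List String) (hpre : Pre_splice_alignment alignment) :
    splice_alignment alignment = splice_alignment_alt alignment := by
  obtain ⟨hlen5, hidx⟩ := hpre
  simp only [splice_alignment, splice_alignment_alt]
  rw [pvALoop_eq _ _ _ 0 (by omega)]
  simp only [List.drop_zero]
  have hmain := pvMain ((alignment.getD 0 "").toList.length)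
    (alignment.getD 0 "").toList (alignment.getD 1 "").toList le_rfl hidx [] [] []
  rcases hA : pvStepRec (alignment.getD 0 "").toList (alignment.getD 1 "").toList
      ([], [], [], []) with ⟨nd, nh, intr, si⟩
  rcases hB : spliceB_runs (alignment.getD 0 "").toList (alignment.getD 1 "").toList
      with ⟨ad, ah, ir⟩
  rw [hA, hB] at hmain
  simp only [pvFinal, List.nil_append, Prod.mk.injEq] at hmain
  obtain ⟨h1, h2, h3⟩ := hmain
  simp [h1, h2, h3]

-- ===== VERDICT (by name: the statement is the Claim_ definition above) =====
theorem splice_alignment_spec : Claim_equal_splice_alignment := by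
  intro alignment _ hpre
  unfold Spec_splice_alignment
  exact pv_top alignment hpre
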